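-- pv_equiv track=rewrite | github.com/df1903/problem_solving_python | compare_triplets.py | compareTriplets
-- ===== SOURCE A (Python) =====
-- def compareTriplets(alice: [int], bob: [int]) -> [int]:
--     result: [int] = [0, 0]
--     for a, b in zip(alice, bob):
--         if a > b:
--             result[0] += 1
--             continue
--         if b > a:
--             result[1] += 1
--     return result
-- ===== SOURCE B (Python) =====
-- def compareTriplets(alice: [int], bob: [int]) -> [int]:
--     n = min(len(alice), len(bob))
--
--     def go(lo, hi):
--         # score on the index range [lo, hi), divide and conquer
--         if hi - lo == 0:
--             return (0, 0)
--         if hi - lo == 1: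
--             a, b = alice[lo], bob[lo]
--             return (int(a > b), int(b > a))
--         mid = (lo + hi) // 2
--         xl, yl = go(lo, mid)
--         xr, yr = go(mid, hi)
--         return (xl + xr, yl + yr)
--
--     x, y = go(0, n)
--     return [x, y]
-- ===== Notes on version B (the rewrite author's own statement) =====
-- stated objective: alternative
-- what changed: Replaces A's single stateful left-to-right loop mutating a two-slot result list with a divide-and-conquer recursion that splits the index range in half, scores each half independently, and combines the two sub-scores by addition.
import Mathlib
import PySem

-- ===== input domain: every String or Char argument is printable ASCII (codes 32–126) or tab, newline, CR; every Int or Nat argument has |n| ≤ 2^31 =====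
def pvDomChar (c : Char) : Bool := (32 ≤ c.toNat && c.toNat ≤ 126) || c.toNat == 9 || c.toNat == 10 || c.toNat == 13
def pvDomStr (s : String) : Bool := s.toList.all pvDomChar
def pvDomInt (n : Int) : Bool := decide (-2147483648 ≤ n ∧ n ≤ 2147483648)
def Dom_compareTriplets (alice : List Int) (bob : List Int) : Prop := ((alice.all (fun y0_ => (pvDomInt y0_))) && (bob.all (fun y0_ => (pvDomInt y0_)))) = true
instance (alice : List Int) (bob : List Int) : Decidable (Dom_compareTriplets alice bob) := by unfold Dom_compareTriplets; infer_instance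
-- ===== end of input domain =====

-- ===== PORT A =====
-- B replaces A's single stateful loop with a divide-and-conquer recursion on
-- index ranges; combining halves by addition is correct because the score is a
-- sum over independent positions (alternative decomposition, same cost).
def compareTriplets (alice : List Int) (bob : List Int) : List Int :=
  -- result = [0, 0]; for a, b in zip(alice, bob): …  (the two slots kept as a pair)
  let result : Int × Int :=
    (alice.zip bob).foldl
      (fun r p =>
        if p.1 > p.2 then (r.1 + 1, r.2)
        else if p.2 > p.1 then (r.1, r.2 + 1)
        else r)
      (0, 0)
  [result.1, result.2]

-- ===== PORT B =====
-- go(lo, hi): the two scores on the index range [lo, hi).  Python's tuple is a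
-- Lean pair; alice[lo] is in range whenever lo < min(len(alice), len(bob)),
-- ported as getD lo 0 (exact on every call the algorithm makes).  The fuel
-- parameter (called with fuel = n ≥ hi - lo) only makes the recursion
-- structural; it never alters the computation.
def goCT (alice bob : List Int) : Nat → Nat → Nat → Int × Int
  | 0, _, _ => (0, 0)
  | fuel + 1, lo, hi =>
    if hi - lo = 0 then (0, 0)
    else if hi - lo = 1 then
      ((if alice.getD lo 0 > bob.getD lo 0 then 1 else 0),
       (if bob.getD lo 0 > alice.getD lo 0 then 1 else 0))
    else
      let mid := (lo + hi) / 2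
      let l := goCT alice bob fuel lo mid
      let r := goCT alice bob fuel mid hi
      (l.1 + r.1, l.2 + r.2)

def compareTriplets_alt (alice : List Int) (bob : List Int) : List Int :=
  let n := min alice.length bob.length
  let p := goCT alice bob n 0 n
  [p.1, p.2]

-- ===== PRECONDITION & SPEC =====
def Spec_compareTriplets (alice : List Int) (bob : List Int) (out : List Int) : Prop := out = compareTriplets_alt alice bob
instance (alice : List Int) (bob : List Int) (out : List Int) : Decidable (Spec_compareTriplets alice bob out) := by unfold Spec_compareTriplets; infer_instance

-- ===== CLAIM (what is proved, stated in full; the proofs are below) =====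
def Claim_equal_compareTriplets : Prop := ∀ (alice : List Int) (bob : List Int), Dom_compareTriplets alice bob → Spec_compareTriplets alice bob (compareTriplets alice bob)

-- ===== LEMMAS AND PROOFS =====
theorem pvFoldCount (l : List (Int × Int)) (x y : Int) :
    l.foldl (fun r p =>
        if p.1 > p.2 then (r.1 + 1, r.2)
        else if p.2 > p.1 then (r.1, r.2 + 1)
        else r) (x, y)
    = (x + l.countP (fun p => p.1 > p.2), y + l.countP (fun p => p.2 > p.1)) := by
  induction l generalizing x y with
  | nil => simp
  | cons h t ih =>
    simp only [List.foldl_cons, List.countP_cons]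
    by_cases h1 : h.1 > h.2
    · simp [h1, show ¬ h.2 > h.1 by omega, ih]; omega
    · by_cases h2 : h.2 > h.1
      · simp [h1, h2, ih]; omega
      · simp [h1, h2, ih]

-- goCT computes the two counts over the slice [lo, hi) of the zipped pairs.
theorem pvGoCount (alice bob : List Int) :
    ∀ (d lo hi : Nat), hi - lo ≤ d → hi ≤ min alice.length bob.length →
    goCT alice bob d lo hi
    = (((((alice.zip bob).drop lo).take (hi - lo)).countP (fun p => p.1 > p.2) : Int),
       ((((alice.zip bob).drop lo).take (hi - lo)).countP (fun p => p.2 > p.1) : Int)) := by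
  intro d
  induction d with
  | zero =>
    intro lo hi hd _
    simp [goCT, Nat.le_zero.mp hd]
  | succ d ih =>
    intro lo hi hd hhi
    rw [goCT]
    by_cases h0 : hi - lo = 0
    · simp [h0]
    · by_cases h1 : hi - lo = 1
      · simp only [h1, if_true]
        have hlt : lo < (alice.zip bob).length := by
          simp [List.length_zip]; omega
        have hdrop : (alice.zip bob).drop lo
            = (alice.zip bob)[lo] :: (alice.zip bob).drop (lo + 1) :=
          List.drop_eq_getElem_cons hlt
        have hla : lo < alice.length := by simp [List.length_zip] at hlt; omega
        have hlb : lo < bob.length := by simp [List.length_zip] at hlt; omega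
        have hget : (alice.zip bob)[lo] = (alice[lo], bob[lo]) := by
          simp [List.getElem_zip]
        have ha : alice.getD lo 0 = alice[lo] := List.getD_eq_getElem _ _ _
        have hb : bob.getD lo 0 = bob[lo] := List.getD_eq_getElem _ _ _
        rw [hdrop]
        simp only [List.take_succ_cons, List.take_zero, List.countP_cons,
          List.countP_nil, hget]
        simp [hla, hlb]
      · simp only [h0, h1, if_false]
        have hm1 : lo < (lo + hi) / 2 := by omega
        have hm2 : (lo + hi) / 2 < hi := by omega
        have hml : (lo + hi) / 2 ≤ min alice.length bob.length := by omega
        have hb1 : (lo + hi) / 2 - lo ≤ d := by omega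
        have hb2 : hi - (lo + hi) / 2 ≤ d := by omega
        simp only [ih lo ((lo + hi) / 2) hb1 hml, ih ((lo + hi) / 2) hi hb2 hhi]
        have hsplit : ((alice.zip bob).drop lo).take (hi - lo)
            = ((alice.zip bob).drop lo).take ((lo + hi) / 2 - lo)
              ++ ((alice.zip bob).drop ((lo + hi) / 2)).take (hi - (lo + hi) / 2) := by
          have he : hi - lo = ((lo + hi) / 2 - lo) + (hi - (lo + hi) / 2) := by omega
          have hdd : (((alice.zip bob).drop lo).drop ((lo + hi) / 2 - lo))
              = (alice.zip bob).drop ((lo + hi) / 2) := by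
            rw [List.drop_drop, Nat.add_sub_cancel' (le_of_lt hm1)]
          rw [he, List.take_add, hdd]
        rw [hsplit]
        simp [List.countP_append]

-- ===== VERDICT (by name: the statement is the Claim_ definition above) =====
theorem compareTriplets_spec : Claim_equal_compareTriplets := by
  intro alice bob _
  show compareTriplets alice bob = compareTriplets_alt alice bob
  have hA : compareTriplets alice bob
      = [((alice.zip bob).countP (fun p => p.1 > p.2) : Int),
         ((alice.zip bob).countP (fun p => p.2 > p.1) : Int)] := by
    unfold compareTriplets
    rw [pvFoldCount]
    simp
  have hB : compareTriplets_alt alice bob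
      = [((alice.zip bob).countP (fun p => p.1 > p.2) : Int),
         ((alice.zip bob).countP (fun p => p.2 > p.1) : Int)] := by
    unfold compareTriplets_alt
    show [(goCT alice bob (min alice.length bob.length) 0 (min alice.length bob.length)).1,
          (goCT alice bob (min alice.length bob.length) 0 (min alice.length bob.length)).2] = _
    rw [pvGoCount alice bob (min alice.length bob.length) 0 (min alice.length bob.length)
      (by omega) (le_refl _)]
    have hlen : (alice.zip bob).length = min alice.length bob.length := List.length_zip
    simp [List.take_of_length_le, hlen]
  rw [hA, hB]
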